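-- pv_equiv track=rewrite | github.com/Zygros/ZYGROS-PRIME | Downloaded/phoenix_universal_api.py | _auto_select_provider
-- ===== SOURCE A (Python) =====
-- from typing import Optional, Dict, List, Any, Literal
--
-- def _auto_select_provider(query: str) -> List[str]:
--     """
--     Intelligently choose best AI for the task.
--
--     Examples:
--     - Code generation -> GPT-4 + Claude
--     - Research synthesis -> Claude + Gemini
--     - Creative writing -> GPT-4 + Grok
--     - Technical analysis -> Claude + Gemini
--     """
--     query_lower = query.lower()
--
--     if any(word in query_lower for word in ["code", "program", "debug", "implement"]):
--         return ["gpt-4", "claude"]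
--     elif any(word in query_lower for word in ["research", "analyze", "synthesize"]):
--         return ["claude", "gemini"]
--     elif any(word in query_lower for word in ["creative", "story", "write"]):
--         return ["gpt-4", "grok"]
--     else:
--         return ["claude"]  # Default to Claude for general queries
-- ===== SOURCE B (Python) =====
-- from typing import List
--
-- _KEYWORDS = [
--     ("code", 0), ("program", 0), ("debug", 0), ("implement", 0),
--     ("research", 1), ("analyze", 1), ("synthesize", 1),
--     ("creative", 2), ("story", 2), ("write", 2),
-- ]
--
-- _PROVIDERS = [["gpt-4", "claude"], ["claude", "gemini"], ["gpt-4", "grok"], ["claude"]]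
--
-- def _auto_select_provider(query: str) -> List[str]:
--     # Single scan over the text: at each position record the best (lowest)
--     # rule rank whose keyword starts there; rank order = A's elif priority.
--     q = query.lower()
--     best = 3
--     for i in range(len(q)):
--         for kw, rank in _KEYWORDS:
--             if rank < best and q.startswith(kw, i):
--                 best = rank
--     return _PROVIDERS[best]
-- ===== Notes on version B (the rewrite author's own statement) =====
-- stated objective: alternative
-- what changed: Instead of A's per-rule any-substring tests over an elif chain, B makes one scan over the lowered query's positions, checking which keyword starts at each position and keeping the minimal rule rank, then indexes a provider table by that rank.
import Mathlib
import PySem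

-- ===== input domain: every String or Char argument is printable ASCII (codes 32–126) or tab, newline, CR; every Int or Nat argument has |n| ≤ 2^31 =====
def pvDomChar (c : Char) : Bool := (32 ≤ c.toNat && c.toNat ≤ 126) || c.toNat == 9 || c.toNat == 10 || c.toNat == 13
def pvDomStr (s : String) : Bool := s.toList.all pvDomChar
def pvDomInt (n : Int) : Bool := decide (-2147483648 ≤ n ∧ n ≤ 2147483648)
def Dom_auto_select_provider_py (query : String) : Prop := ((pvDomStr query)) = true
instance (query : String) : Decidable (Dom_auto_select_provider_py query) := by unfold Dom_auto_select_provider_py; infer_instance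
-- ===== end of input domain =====

-- B replaces A's per-rule any-substring elif chain by one scan over the lowered query's
-- positions keeping the minimal matching rule rank (alternative decomposition; same cost).

-- ===== PORT A =====
def auto_select_provider_py (query : String) : List String :=
  let query_lower := PySem.Str.lower query
  if ["code", "program", "debug", "implement"].any (fun word => PySem.Str.isIn word query_lower) then
    ["gpt-4", "claude"]
  else if ["research", "analyze", "synthesize"].any (fun word => PySem.Str.isIn word query_lower) then
    ["claude", "gemini"]
  else if ["creative", "story", "write"].any (fun word => PySem.Str.isIn word query_lower) then
    ["gpt-4", "grok"]
  else
    ["claude"]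

-- ===== PORT B =====
def pvKeywords : List (String × Nat) :=
  [("code", 0), ("program", 0), ("debug", 0), ("implement", 0),
   ("research", 1), ("analyze", 1), ("synthesize", 1),
   ("creative", 2), ("story", 2), ("write", 2)]

def pvProviders : List (List String) :=
  [["gpt-4", "claude"], ["claude", "gemini"], ["gpt-4", "grok"], ["claude"]]

-- Source B's position loop: structural recursion over the suffixes of the lowered query
-- (the suffix starting at i is what q.startswith(kw, i) inspects: kw.toList.isPrefixOf).
def pvScan : List Char → Nat → Nat
  | [], best => best
  | t@(_ :: rest), best =>
      pvScan rest
        (pvKeywords.foldl (fun b p => if p.2 < b ∧ p.1.toList.isPrefixOf t then p.2 else b) best)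

def auto_select_provider_py_alt (query : String) : List String :=
  let q := PySem.Str.lower query
  let best := pvScan q.toList 3
  pvProviders.getD best []

-- ===== PRECONDITION & SPEC =====
def Spec_auto_select_provider_py (query : String) (out : List String) : Prop := out = auto_select_provider_py_alt query
instance (query : String) (out : List String) : Decidable (Spec_auto_select_provider_py query out) := by unfold Spec_auto_select_provider_py; infer_instance

-- ===== CLAIM (what is proved, stated in full; the proofs are below) =====
def Claim_equal_auto_select_provider_py : Prop := ∀ (query : String), Dom_auto_select_provider_py query → Spec_auto_select_provider_py query (auto_select_provider_py query)

-- ===== LEMMAS AND PROOFS =====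

-- rank of the first rule with a keyword starting right at t (prefix position match), 3 if none
def pvP (t : List Char) : Nat :=
  if ("code".toList.isPrefixOf t || ("program".toList.isPrefixOf t || ("debug".toList.isPrefixOf t || "implement".toList.isPrefixOf t))) then 0
  else if ("research".toList.isPrefixOf t || ("analyze".toList.isPrefixOf t || "synthesize".toList.isPrefixOf t)) then 1
  else if ("creative".toList.isPrefixOf t || ("story".toList.isPrefixOf t || "write".toList.isPrefixOf t)) then 2
  else 3

-- rank of the first rule with a keyword occurring anywhere in s (A's branch selector), 3 if none
def pvM (s : List Char) : Nat :=
  if (PySem.Chars.isIn "code".toList s || (PySem.Chars.isIn "program".toList s || (PySem.Chars.isIn "debug".toList s || PySem.Chars.isIn "implement".toList s))) then 0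
  else if (PySem.Chars.isIn "research".toList s || (PySem.Chars.isIn "analyze".toList s || PySem.Chars.isIn "synthesize".toList s)) then 1
  else if (PySem.Chars.isIn "creative".toList s || (PySem.Chars.isIn "story".toList s || PySem.Chars.isIn "write".toList s)) then 2
  else 3

lemma pvP_le (t : List Char) : pvP t ≤ 3 := by
  unfold pvP; split_ifs <;> omega

lemma pvM_le (s : List Char) : pvM s ≤ 3 := by
  unfold pvM; split_ifs <;> omega

-- the inner keyword loop over one constant-rank group of the table
lemma pvGroupFold (t : List Char) (r : Nat) (ws : List String) (b : Nat) :
    (ws.map (fun w => (w, r))).foldl (fun b p => if p.2 < b ∧ p.1.toList.isPrefixOf t then p.2 else b) b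
      = if r < b ∧ ws.any (fun w => w.toList.isPrefixOf t) then r else b := by
  induction ws generalizing b with
  | nil => simp
  | cons w ws ih =>
      simp only [List.map_cons, List.foldl_cons, List.any_cons, ih]
      by_cases hw : w.toList.isPrefixOf t = true <;>
      by_cases hany : ws.any (fun w => w.toList.isPrefixOf t) = true <;>
      by_cases hrb : r < b <;>
        simp [hw, hany, hrb]

-- the whole inner keyword loop at one position computes min of the incoming best and pvP
set_option maxHeartbeats 2000000 in
lemma pvInner (t : List Char) (b : Nat) (hb : b ≤ 3) :
    pvKeywords.foldl (fun b p => if p.2 < b ∧ p.1.toList.isPrefixOf t then p.2 else b) b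
      = min b (pvP t) := by
  have hsplit : pvKeywords =
      (["code","program","debug","implement"].map (fun w => (w, 0))) ++
      ((["research","analyze","synthesize"].map (fun w => (w, 1))) ++
       (["creative","story","write"].map (fun w => (w, 2)))) := rfl
  rw [hsplit, List.foldl_append, List.foldl_append, pvGroupFold, pvGroupFold, pvGroupFold]
  unfold pvP
  simp only [List.any_cons, List.any_nil, Bool.or_false]
  interval_cases b <;> split_ifs <;> simp_all

lemma pvIsIn_cons (kw : List Char) (c : Char) (rest : List Char) :
    PySem.Chars.isIn kw (c :: rest) = (kw.isPrefixOf (c :: rest) || PySem.Chars.isIn kw rest) := by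
  rw [Bool.eq_iff_iff]
  simp [PySem.Chars.isIn_iff_infix, List.infix_cons_iff, List.isPrefixOf_iff_prefix]

lemma pvG0 (c : Char) (rest : List Char) :
    (PySem.Chars.isIn "code".toList (c :: rest) || (PySem.Chars.isIn "program".toList (c :: rest) || (PySem.Chars.isIn "debug".toList (c :: rest) || PySem.Chars.isIn "implement".toList (c :: rest))))
      = (("code".toList.isPrefixOf (c :: rest) || ("program".toList.isPrefixOf (c :: rest) || ("debug".toList.isPrefixOf (c :: rest) || "implement".toList.isPrefixOf (c :: rest))))
         || (PySem.Chars.isIn "code".toList rest || (PySem.Chars.isIn "program".toList rest || (PySem.Chars.isIn "debug".toList rest || PySem.Chars.isIn "implement".toList rest)))) := by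
  rw [Bool.eq_iff_iff]
  simp only [pvIsIn_cons, Bool.or_eq_true]
  tauto

lemma pvG1 (c : Char) (rest : List Char) :
    (PySem.Chars.isIn "research".toList (c :: rest) || (PySem.Chars.isIn "analyze".toList (c :: rest) || PySem.Chars.isIn "synthesize".toList (c :: rest)))
      = (("research".toList.isPrefixOf (c :: rest) || ("analyze".toList.isPrefixOf (c :: rest) || "synthesize".toList.isPrefixOf (c :: rest)))
         || (PySem.Chars.isIn "research".toList rest || (PySem.Chars.isIn "analyze".toList rest || PySem.Chars.isIn "synthesize".toList rest))) := by
  rw [Bool.eq_iff_iff]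
  simp only [pvIsIn_cons, Bool.or_eq_true]
  tauto

lemma pvG2 (c : Char) (rest : List Char) :
    (PySem.Chars.isIn "creative".toList (c :: rest) || (PySem.Chars.isIn "story".toList (c :: rest) || PySem.Chars.isIn "write".toList (c :: rest)))
      = (("creative".toList.isPrefixOf (c :: rest) || ("story".toList.isPrefixOf (c :: rest) || "write".toList.isPrefixOf (c :: rest)))
         || (PySem.Chars.isIn "creative".toList rest || (PySem.Chars.isIn "story".toList rest || PySem.Chars.isIn "write".toList rest))) := by
  rw [Bool.eq_iff_iff]
  simp only [pvIsIn_cons, Bool.or_eq_true]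
  tauto

lemma pvChain (x0 y0 x1 y1 x2 y2 : Bool) :
    (if (x0 || y0) then 0 else if (x1 || y1) then 1 else if (x2 || y2) then 2 else 3 : Nat)
      = min (if x0 then 0 else if x1 then 1 else if x2 then 2 else 3)
            (if y0 then 0 else if y1 then 1 else if y2 then 2 else 3) := by
  revert x0 y0 x1 y1 x2 y2
  decide

lemma pvM_cons (c : Char) (rest : List Char) :
    pvM (c :: rest) = min (pvP (c :: rest)) (pvM rest) := by
  unfold pvM pvP
  rw [pvG0, pvG1, pvG2]
  exact pvChain _ _ _ _ _ _

lemma pvM_nil : pvM [] = 3 := by decide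

-- loop invariant: the scan computes min of the running best and A's branch selector
lemma pvScan_eq (s : List Char) (b : Nat) (hb : b ≤ 3) :
    pvScan s b = min b (pvM s) := by
  induction s generalizing b with
  | nil => simp [pvScan, pvM_nil]; omega
  | cons c rest ih =>
      rw [pvScan, pvInner _ _ hb,
          ih _ (by have := pvP_le (c :: rest); omega), pvM_cons]
      have := pvP_le (c :: rest); have := pvM_le rest
      omega

-- ===== VERDICT (by name: the statement is the Claim_ definition above) =====
theorem auto_select_provider_py_spec : Claim_equal_auto_select_provider_py := by
  intro query _
  unfold Spec_auto_select_provider_py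
  show auto_select_provider_py query = auto_select_provider_py_alt query
  simp only [auto_select_provider_py, auto_select_provider_py_alt]
  rw [pvScan_eq _ 3 (by omega)]
  rw [show min 3 (pvM (PySem.Str.lower query).toList) = pvM (PySem.Str.lower query).toList from by
        have := pvM_le (PySem.Str.lower query).toList; omega]
  simp only [List.any_cons, List.any_nil, Bool.or_false, PySem.Str.isIn_eq]
  unfold pvM
  split_ifs <;> rfl
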